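-- pv_equiv track=rewrite | github.com/LachezarStoev/Programming-101 | magic_string/solution.py | magic_string
-- ===== SOURCE A (Python) =====
-- def magic_string(str):
-- 	changed = 0
-- 	for i in range(0,len(str)//2):
-- 		if str[i] == "<":
-- 			changed+=1
-- 		if str[len(str)-i-1]== ">":
-- 			changed+=1
-- 	return changed
-- ===== SOURCE B (Python) =====
-- def magic_string(str):
--     changed = 0
--     while len(str) >= 2:
--         changed += (str[0] == '<') + (str[-1] == '>')
--         str = str[1:-1]
--     return changed
-- ===== Notes on version B (the rewrite author's own statement) =====
-- stated objective: alternative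
-- what changed: replaces A's index loop over range(len//2) with mirrored lookups by a loop that repeatedly peels the outermost character pair off the string (inspect str[0] and str[-1], then shrink to str[1:-1]) until at most one character remains, so no index arithmetic is needed
import Mathlib
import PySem

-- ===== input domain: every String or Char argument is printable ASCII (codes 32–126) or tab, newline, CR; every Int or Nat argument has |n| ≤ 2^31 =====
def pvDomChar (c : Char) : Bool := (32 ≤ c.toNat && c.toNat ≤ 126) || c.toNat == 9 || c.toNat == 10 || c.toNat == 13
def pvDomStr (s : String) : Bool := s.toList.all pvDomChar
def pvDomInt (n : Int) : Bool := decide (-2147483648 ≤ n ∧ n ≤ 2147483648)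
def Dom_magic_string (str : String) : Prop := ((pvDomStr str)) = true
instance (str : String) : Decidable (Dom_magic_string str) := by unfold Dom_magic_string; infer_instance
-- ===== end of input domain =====

-- B replaces A's mirrored index loop with a loop that peels the outermost character
-- pair off the string until at most one character remains (objective: alternative).

-- ===== PORT A =====
def magic_string (str : String) : Int :=
  let l := str.toList
  let n : Int := (l.length : Int)
  (PySem.List.pyRange 0 (PySem.Int.floordiv n 2) 1).foldl
    (fun changed i =>
      let changed := if PySem.List.pyGetD l i ' ' = '<' then changed + 1 else changed
      if PySem.List.pyGetD l (n - i - 1) ' ' = '>' then changed + 1 else changed)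
    0

-- ===== PORT B =====
-- the while loop of Source B: peel str[0] / str[-1], recurse on str[1:-1]
def magicPeel (l : List Char) (changed : Int) : Int :=
  if h : 2 ≤ l.length then
    magicPeel (PySem.List.slice l (some 1) (some (-1)))
      (changed + ((if PySem.List.pyGetD l 0 ' ' = '<' then 1 else 0)
                + (if PySem.List.pyGetD l (-1) ' ' = '>' then 1 else 0)))
  else changed
termination_by l.length
decreasing_by
  simp only [PySem.List.length_slice, PySem.List.clampIdx_neg_one]
  simp [PySem.List.clampIdx]
  omega

def magic_string_alt (str : String) : Int := magicPeel str.toList 0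

-- ===== PRECONDITION & SPEC =====
def Spec_magic_string (str : String) (out : Int) : Prop := out = magic_string_alt str
instance (str : String) (out : Int) : Decidable (Spec_magic_string str out) := by unfold Spec_magic_string; infer_instance

-- ===== CLAIM (what is proved, stated in full; the proofs are below) =====
def Claim_equal_magic_string : Prop := ∀ (str : String), Dom_magic_string str → Spec_magic_string str (magic_string str)

-- ===== LEMMAS AND PROOFS =====

-- the common reference value: '<'-count in the first half plus '>'-count in the last half
def halves (l : List Char) : Int :=
  ((l.take (l.length / 2)).count '<' : Int) + ((l.drop (l.length - l.length / 2)).count '>' : Int)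

-- first-half sum of A's loop: ∑_{i<k} [l[i] = c] = count of c in take k l
lemma sum_ite_take (l : List Char) (c : Char) (k : Nat) (hk : k ≤ l.length) :
    ((List.range k).map (fun i => if l.getD i ' ' = c then (1 : Int) else 0)).sum
      = ((l.take k).count c : Int) := by
  induction k with
  | zero => simp
  | succ k ih =>
    have hk' : k < l.length := hk
    rw [List.range_succ, List.map_append, List.sum_append, ih (le_of_lt hk'),
        List.take_add_one, List.count_append]
    by_cases h : l[k] = c <;> simp [h, List.getElem?_eq_getElem hk']

-- second-half sum of A's loop: ∑_{i<k} [l[len-1-i] = c] = count of c in drop (len-k) l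
lemma sum_ite_drop (l : List Char) (c : Char) (k : Nat) (hk : k ≤ l.length) :
    ((List.range k).map (fun i => if l.getD (l.length - 1 - i) ' ' = c then (1 : Int) else 0)).sum
      = ((l.drop (l.length - k)).count c : Int) := by
  induction k with
  | zero => simp
  | succ k ih =>
    have hk' : k < l.length := hk
    have hidx : l.length - 1 - k < l.length := by omega
    have hdrop : l.drop (l.length - (k + 1)) = l[l.length - 1 - k] :: l.drop (l.length - k) := by
      have h1 : l.length - (k + 1) < l.length := by omega
      rw [List.drop_eq_getElem_cons h1]
      congr 2 <;> omega
    rw [List.range_succ, List.map_append, List.sum_append, ih (le_of_lt hk'), hdrop,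
        List.count_cons]
    by_cases h : l[l.length - 1 - k] = c <;> simp [h, List.getElem?_eq_getElem hidx]

-- A's fold over range(len//2) equals the two half counts
lemma magic_A_eq_halves (l : List Char) :
    (PySem.List.pyRange 0 (PySem.Int.floordiv (l.length : Int) 2) 1).foldl
      (fun changed i =>
        let changed := if PySem.List.pyGetD l i ' ' = '<' then changed + 1 else changed
        if PySem.List.pyGetD l ((l.length : Int) - i - 1) ' ' = '>' then changed + 1 else changed)
      0 = halves l := by
  have hhalf : PySem.Int.floordiv (l.length : Int) 2 = ((l.length / 2 : Nat) : Int) :=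
    PySem.Int.floordiv_natCast l.length 2
  rw [hhalf, PySem.List.pyRange_zero_natCast, List.foldl_map]
  refine Eq.trans (PySem.List.foldl_congr_mem _ _
    (fun changed (i : Nat) =>
      changed + ((if l.getD i ' ' = '<' then (1 : Int) else 0)
        + (if l.getD (l.length - 1 - i) ' ' = '>' then (1 : Int) else 0))) 0 ?_) ?_
  · intro acc i hi
    have hi' : i < l.length / 2 := List.mem_range.mp hi
    have h2 : (l.length : Int) - (i : Int) - 1 = ((l.length - 1 - i : Nat) : Int) := by
      have : i < l.length := lt_of_lt_of_le hi' (Nat.div_le_self _ _)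
      omega
    simp only [PySem.List.pyGetD_natCast, h2]
    split_ifs <;> ring
  · rw [PySem.List.foldl_add, PySem.List.sum_map_add_int, zero_add,
      sum_ite_take l '<' (l.length / 2) (Nat.div_le_self _ _),
      sum_ite_drop l '>' (l.length / 2) (Nat.div_le_self _ _)]
    rfl

-- str[1:-1] on a list written as x :: m ++ [y]
lemma slice_one_negone (x y : Char) (m : List Char) :
    PySem.List.slice (x :: (m ++ [y])) (some 1) (some (-1)) = m := by
  have h0 : ¬((m.length : Int) + 1 < 0) := by omega
  simp [PySem.List.slice, PySem.List.clampIdx, h0]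

-- peeling the outer pair adds exactly their contribution to halves
lemma halves_cons_concat (x y : Char) (m : List Char) :
    halves (x :: (m ++ [y]))
      = ((if x = '<' then 1 else 0) + (if y = '>' then 1 else 0)) + halves m := by
  unfold halves
  have hlen : (x :: (m ++ [y])).length = m.length + 2 := by simp
  have hdiv : (m.length + 2) / 2 = m.length / 2 + 1 := by omega
  have hle : m.length / 2 <= m.length := Nat.div_le_self _ _
  rw [hlen, hdiv]
  have htake : (x :: (m ++ [y])).take (m.length / 2 + 1) = x :: m.take (m.length / 2) := by
    simp [List.take_succ_cons, List.take_append, Nat.sub_eq_zero_of_le hle]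
  have hdropn : m.length + 2 - (m.length / 2 + 1) = (m.length - m.length / 2) + 1 := by omega
  have hdrop : (x :: (m ++ [y])).drop ((m.length - m.length / 2) + 1)
      = m.drop (m.length - m.length / 2) ++ [y] := by
    simp [List.drop_succ_cons, List.drop_append,
      Nat.sub_eq_zero_of_le (Nat.sub_le m.length (m.length / 2))]
  rw [htake, hdropn, hdrop, List.count_cons, List.count_append]
  simp only [List.count_singleton]
  by_cases hx : x = '<' <;> by_cases hy : y = '>' <;>
    simp [hx, hy, beq_iff_eq] <;> ring

-- B's peel loop computes changed + halves
lemma magicPeel_eq_halves : ∀ (n : Nat) (l : List Char), l.length = n →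
    ∀ changed : Int, magicPeel l changed = changed + halves l := by
  intro n
  induction n using Nat.strong_induction_on with
  | _ n ih =>
    intro l hl changed
    rw [magicPeel]
    by_cases h : 2 ≤ l.length
    · have hne : l ≠ [] := by intro e; simp [e] at h
      obtain ⟨x, l', rfl⟩ := List.exists_cons_of_ne_nil hne
      rcases List.eq_nil_or_concat l' with rfl | ⟨m, y, rfl⟩
      · simp at h
      simp only [List.concat_eq_append] at hl h ⊢
      simp only [h, dif_pos]
      rw [slice_one_negone]
      rw [ih m.length (by simp at hl ⊢; omega) m rfl, halves_cons_concat]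
      have hx : PySem.List.pyGetD (x :: (m ++ [y])) 0 ' ' = x := PySem.List.pyGetD_zero_cons x _ ' '
      have hy : PySem.List.pyGetD (x :: (m ++ [y])) (-1) ' ' = y := by
        have := PySem.List.pyGetD_neg_one_append_singleton (xs := x :: m) (x := y) (d := ' ')
        simpa using this
      rw [hx, hy]; ring
    · have hlen : l.length = 0 ∨ l.length = 1 := by omega
      have : halves l = 0 := by
        rcases hlen with h0 | h1
        · unfold halves; rw [h0]; simp [List.eq_nil_of_length_eq_zero h0]
        · obtain ⟨c, rfl⟩ := List.length_eq_one_iff.mp h1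
          unfold halves; simp
      simp [h, this]

-- ===== VERDICT (by name: the statement is the Claim_ definition above) =====
theorem magic_string_spec : Claim_equal_magic_string := by
  intro str _
  unfold Spec_magic_string magic_string magic_string_alt
  rw [magic_A_eq_halves, magicPeel_eq_halves str.toList.length str.toList rfl 0, zero_add]
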